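-- pv_equiv track=rewrite | github.com/recscse/tradingbot | router/gap_detector_router.py | _calculate_overall_bias
-- ===== SOURCE A (Python) =====
-- from typing import List, Dict, Any, Optional
--
-- def _calculate_overall_bias(gaps: List[Dict[str, Any]]) -> str:
--     """Calculate overall market bias from gap signals"""
--     try:
--         if not gaps:
--             return "neutral"
--
--         bullish_count = len([g for g in gaps if g.get('bias') == 'bullish'])
--         bearish_count = len([g for g in gaps if g.get('bias') == 'bearish'])
--
--         if bullish_count > bearish_count:
--             return "bullish"
--         elif bearish_count > bullish_count:
--             return "bearish"
--         else:
--             return "neutral"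
--
--     except Exception:
--         return "neutral"
-- ===== SOURCE B (Python) =====
-- from typing import List, Dict, Any
--
-- def _calculate_overall_bias(gaps: List[Dict[str, Any]]) -> str:
--     """Calculate overall market bias from gap signals"""
--     try:
--         if not gaps:
--             return "neutral"
--         net = 0
--         for g in gaps:
--             b = g.get('bias')
--             if b == 'bullish':
--                 net += 1
--             elif b == 'bearish':
--                 net -= 1
--         if net > 0:
--             return "bullish"
--         if net < 0:
--             return "bearish"
--         return "neutral"
--     except Exception:
--         return "neutral"
-- ===== Notes on version B (the rewrite author's own statement) =====
-- stated objective: simpler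
-- what changed: Replaces the two filtered-count comprehensions (two passes) with a single pass maintaining one signed accumulator net (+1 bullish, -1 bearish) and returns by the sign of net.
import Mathlib
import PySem

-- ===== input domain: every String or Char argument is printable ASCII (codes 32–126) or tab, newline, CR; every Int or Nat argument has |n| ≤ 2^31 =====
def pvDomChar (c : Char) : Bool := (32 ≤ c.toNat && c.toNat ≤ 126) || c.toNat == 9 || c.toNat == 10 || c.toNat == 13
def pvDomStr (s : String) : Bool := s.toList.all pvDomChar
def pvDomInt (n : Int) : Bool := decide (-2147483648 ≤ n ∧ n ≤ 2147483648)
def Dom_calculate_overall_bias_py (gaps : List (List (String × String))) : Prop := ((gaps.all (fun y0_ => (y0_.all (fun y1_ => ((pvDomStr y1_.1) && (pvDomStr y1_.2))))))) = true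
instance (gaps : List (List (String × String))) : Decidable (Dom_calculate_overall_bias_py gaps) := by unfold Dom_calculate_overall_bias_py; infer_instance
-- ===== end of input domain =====

-- B replaces the two filtered-count passes with one pass over a single signed accumulator (simpler).

-- ===== PORT A =====
def calculate_overall_bias_py (gaps : List (List (String × String))) : String :=
  if gaps = [] then "neutral"
  else
    let bullish_count : Int := (gaps.filter (fun g => PySem.Dict.get? (PySem.Dict.mk g) "bias" == some "bullish")).length
    let bearish_count : Int := (gaps.filter (fun g => PySem.Dict.get? (PySem.Dict.mk g) "bias" == some "bearish")).length
    if bullish_count > bearish_count then "bullish"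
    else if bearish_count > bullish_count then "bearish"
    else "neutral"

-- ===== PORT B =====
def calculate_overall_bias_py_alt (gaps : List (List (String × String))) : String :=
  if gaps = [] then "neutral"
  else
    let net : Int := gaps.foldl (fun n g =>
      let b := PySem.Dict.get? (PySem.Dict.mk g) "bias"
      if b == some "bullish" then n + 1
      else if b == some "bearish" then n - 1
      else n) 0
    if net > 0 then "bullish"
    else if net < 0 then "bearish"
    else "neutral"

-- ===== PRECONDITION & SPEC =====
def Spec_calculate_overall_bias_py (gaps : List (List (String × String))) (out : String) : Prop := out = calculate_overall_bias_py_alt gaps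
instance (gaps : List (List (String × String))) (out : String) : Decidable (Spec_calculate_overall_bias_py gaps out) := by unfold Spec_calculate_overall_bias_py; infer_instance

-- ===== CLAIM (what is proved, stated in full; the proofs are below) =====
def Claim_equal_calculate_overall_bias_py : Prop := ∀ (gaps : List (List (String × String))), Dom_calculate_overall_bias_py gaps → Spec_calculate_overall_bias_py gaps (calculate_overall_bias_py gaps)

-- ===== LEMMAS AND PROOFS =====

-- the loop accumulator equals start + bullish count - bearish count
theorem pv_net_eq (gaps : List (List (String × String))) (n0 : Int) :
    gaps.foldl (fun n g =>
      let b := PySem.Dict.get? (PySem.Dict.mk g) "bias"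
      if b == some "bullish" then n + 1
      else if b == some "bearish" then n - 1
      else n) n0
    = n0 + ((gaps.filter (fun g => PySem.Dict.get? (PySem.Dict.mk g) "bias" == some "bullish")).length : Int)
         - ((gaps.filter (fun g => PySem.Dict.get? (PySem.Dict.mk g) "bias" == some "bearish")).length : Int) := by
  induction gaps generalizing n0 with
  | nil => simp
  | cons g gs ih =>
    simp only [List.foldl_cons, List.filter_cons]
    by_cases hb : PySem.Dict.get? (PySem.Dict.mk g) "bias" == some "bullish"
    · have hb2 : ¬ (PySem.Dict.get? (PySem.Dict.mk g) "bias" == some "bearish") := by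
        simp only [beq_iff_eq] at hb ⊢; rw [hb]; simp
      simp only [hb, hb2, if_true, if_false, ih, List.length_cons, Bool.false_eq_true]
      push_cast; ring
    · by_cases hc : PySem.Dict.get? (PySem.Dict.mk g) "bias" == some "bearish"
      · simp only [hb, hc, if_true, if_false, ih, List.length_cons, Bool.false_eq_true]
        push_cast; ring
      · simp only [hb, hc, if_false, ih, Bool.false_eq_true]

-- ===== VERDICT (by name: the statement is the Claim_ definition above) =====
theorem calculate_overall_bias_py_spec : Claim_equal_calculate_overall_bias_py := by
  intro gaps _
  unfold Spec_calculate_overall_bias_py calculate_overall_bias_py calculate_overall_bias_py_alt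
  by_cases h : gaps = []
  · simp [h]
  · simp only [h, if_false]
    rw [pv_net_eq]
    split_ifs with h1 h2 h3 h4 <;> first | rfl | omega
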